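-- pv_equiv track=rewrite | github.com/AVoskoboinikov/ts | www/api/hug/helpers.py | isTrendMovingDown2
-- ===== SOURCE A (Python) =====
-- def isTrendMovingDown2(ticks):
-- 	sumUp = 0
-- 	sumDown = 0
--
-- 	for i in range(1, len(ticks)):
-- 		diff = ticks[i] - ticks[i-1]
--
-- 		if diff > 0:
-- 			sumUp += diff
--
-- 		if diff < 0:
-- 			sumDown += abs(diff)
--
-- 	return sumDown > sumUp
-- ===== SOURCE B (Python) =====
-- def isTrendMovingDown2(ticks):
--     # Telescoping: sumUp - sumDown equals (last tick - first tick),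
--     # so sumDown > sumUp iff the last tick is below the first.
--     return len(ticks) >= 2 and ticks[-1] < ticks[0]
-- ===== Notes on version B (the rewrite author's own statement) =====
-- stated objective: faster
-- what changed: Replaces the O(n) loop summing positive and negative tick differences with the O(1) telescoping identity sumUp - sumDown = last tick minus first tick, so the result is just a comparison of the last tick with the first (False for fewer than 2 ticks).
import Mathlib
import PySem

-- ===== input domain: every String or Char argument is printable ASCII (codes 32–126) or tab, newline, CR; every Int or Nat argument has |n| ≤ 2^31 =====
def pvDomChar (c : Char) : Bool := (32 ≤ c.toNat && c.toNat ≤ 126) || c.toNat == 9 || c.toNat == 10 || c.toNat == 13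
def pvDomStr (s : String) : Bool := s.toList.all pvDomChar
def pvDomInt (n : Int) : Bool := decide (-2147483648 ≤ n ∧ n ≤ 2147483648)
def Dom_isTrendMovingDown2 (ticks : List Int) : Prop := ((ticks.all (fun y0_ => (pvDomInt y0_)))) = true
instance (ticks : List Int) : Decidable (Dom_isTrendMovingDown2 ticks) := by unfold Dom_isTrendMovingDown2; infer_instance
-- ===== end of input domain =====

-- B replaces A's O(n) loop over tick differences by the O(1) telescoping test: last tick below first tick.


-- ===== PORT A =====
-- loop body of A: diff = ticks[i] - ticks[i-1]; accumulate into (sumUp, sumDown)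
def stepA (ticks : List Int) (s : Int × Int) (i : Int) : Int × Int :=
  let diff := PySem.List.pyGetD ticks i 0 - PySem.List.pyGetD ticks (i - 1) 0
  (if diff > 0 then s.1 + diff else s.1, if diff < 0 then s.2 + |diff| else s.2)

def isTrendMovingDown2 (ticks : List Int) : Bool :=
  let r := (PySem.List.pyRange 1 (ticks.length : Int) 1).foldl (stepA ticks) (0, 0)
  decide (r.2 > r.1)

-- ===== PORT B =====
def isTrendMovingDown2_alt (ticks : List Int) : Bool :=
  decide ((2 : Int) ≤ ticks.length) && decide (PySem.List.pyGetD ticks (-1) 0 < PySem.List.pyGetD ticks 0 0)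

-- ===== PRECONDITION & SPEC =====
def Spec_isTrendMovingDown2 (ticks : List Int) (out : Bool) : Prop := out = isTrendMovingDown2_alt ticks
instance (ticks : List Int) (out : Bool) : Decidable (Spec_isTrendMovingDown2 ticks out) := by unfold Spec_isTrendMovingDown2; infer_instance

-- ===== CLAIM (what is proved, stated in full; the proofs are below) =====
def Claim_equal_isTrendMovingDown2 : Prop := ∀ (ticks : List Int), Dom_isTrendMovingDown2 ticks → Spec_isTrendMovingDown2 ticks (isTrendMovingDown2 ticks)

-- ===== LEMMAS AND PROOFS =====

-- one loop step changes sumUp - sumDown by exactly diff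
theorem stepA_diff (ticks : List Int) (s : Int × Int) (i : Int) :
    (stepA ticks s i).1 - (stepA ticks s i).2
      = s.1 - s.2 + (PySem.List.pyGetD ticks i 0 - PySem.List.pyGetD ticks (i - 1) 0) := by
  simp only [stepA]
  split_ifs with h1 h2 h2
  · exact absurd h2 (by omega)
  · ring
  · rw [abs_of_neg h2]; ring
  · omega

-- the loop telescopes: after processing indices 1..n-1, sumUp - sumDown = ticks[n-1] - ticks[0]
theorem loop_telescope (ticks : List Int) :
    ∀ n : Nat, 1 ≤ n → n ≤ ticks.length → ∀ s : Int × Int,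
      ((PySem.List.pyRange 1 (n : Int) 1).foldl (stepA ticks) s).1
        - ((PySem.List.pyRange 1 (n : Int) 1).foldl (stepA ticks) s).2
      = s.1 - s.2 + (PySem.List.pyGetD ticks ((n : Int) - 1) 0 - PySem.List.pyGetD ticks 0 0) := by
  intro n
  induction n with
  | zero => intro h; omega
  | succ m ih =>
    intro _ hlen s
    by_cases hm : 1 ≤ m
    · have h1 : (1 : Int) ≤ (m : Int) := by exact_mod_cast hm
      have hsplit : PySem.List.pyRange 1 ((m + 1 : Nat) : Int) 1
          = PySem.List.pyRange 1 (m : Int) 1 ++ [(m : Int)] := by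
        push_cast
        exact PySem.List.pyRange_one_succ_right h1
      rw [hsplit, List.foldl_append]
      simp only [List.foldl]
      rw [stepA_diff]
      rw [ih hm (by omega) s]
      rw [show ((m + 1 : Nat) : Int) - 1 = (m : Int) by push_cast; ring]
      ring
    · have hm0 : m = 0 := by omega
      subst hm0
      have : PySem.List.pyRange 1 ((1 : Nat) : Int) 1 = [] := by
        apply PySem.List.pyRange_one_eq_nil; norm_num
      simp

-- ===== VERDICT (by name: the statement is the Claim_ definition above) =====
theorem isTrendMovingDown2_spec : Claim_equal_isTrendMovingDown2 := by
  intro ticks _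
  unfold Spec_isTrendMovingDown2
  rcases ticks with _ | ⟨x, rest⟩
  · rfl
  rcases rest with _ | ⟨y, rest'⟩
  · norm_num [isTrendMovingDown2, isTrendMovingDown2_alt, PySem.List.pyRange_one_eq_nil]
  · set xs := x :: y :: rest' with hxs
    have hlen2 : 2 ≤ xs.length := by simp [hxs]
    have htel := loop_telescope xs xs.length (by omega) le_rfl (0, 0)
    have hlast : PySem.List.pyGetD xs (-1) 0 = xs[xs.length - 1] :=
      PySem.List.pyGetD_neg_ofNat xs 1 0 (by omega) (by omega)
    have hcast : ((xs.length : Int) - 1) = ((xs.length - 1 : Nat) : Int) := by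
      push_cast [Nat.cast_sub (by omega : 1 ≤ xs.length)]; ring
    have hidx : PySem.List.pyGetD xs ((xs.length : Int) - 1) 0 = xs[xs.length - 1] := by
      rw [hcast, PySem.List.pyGetD_natCast]
      exact List.getD_eq_getElem xs 0 (by omega)
    have hzero : PySem.List.pyGetD xs (0 : Int) 0 = xs[0] := by
      rw [PySem.List.pyGetD_zero]
      exact List.getD_eq_getElem xs 0 (by omega)
    simp only [isTrendMovingDown2, isTrendMovingDown2_alt]
    rw [hidx, hzero] at htel
    rw [hlast, hzero]
    have h2 : (2 : Int) ≤ (xs.length : Int) := by exact_mod_cast hlen2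
    rw [decide_eq_true h2, Bool.true_and, decide_eq_decide]
    constructor <;> intro h <;> omega
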